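-- pv_equiv track=rewrite | github.com/unioslo/pysquril | pysquril/parser.py | _index_clauses
-- ===== SOURCE A (Python) =====
-- def _index_clauses(uri_query: str) -> list:
--     """
--     Find the index positions in the uri_query
--     which mark the separator `&` between clauses,
--     taking into account that ampersand can be
--     used inside quoted values of where clauses.
--
--     """
--     positions = []
--     is_quoted = False
--     for idx, token in enumerate(uri_query):
--         if token == "'":
--             is_quoted = not is_quoted
--         if token == "&" and not is_quoted:
--             positions.append(idx)
--     return positions
-- ===== SOURCE B (Python) =====
-- def _index_clauses(uri_query: str) -> list:
--     positions = []
--     offset = 0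
--     for i, segment in enumerate(uri_query.split("'")):
--         if i % 2 == 0:
--             for j, ch in enumerate(segment):
--                 if ch == "&":
--                     positions.append(offset + j)
--         offset += len(segment) + 1
--     return positions
-- ===== Notes on version B (the rewrite author's own statement) =====
-- stated objective: alternative
-- what changed: Replaces the char-by-char scan with a toggling is_quoted flag by splitting on the quote character and collecting ampersand positions only from even-indexed (outside-quote) segments while tracking a running offset.
import Mathlib
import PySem

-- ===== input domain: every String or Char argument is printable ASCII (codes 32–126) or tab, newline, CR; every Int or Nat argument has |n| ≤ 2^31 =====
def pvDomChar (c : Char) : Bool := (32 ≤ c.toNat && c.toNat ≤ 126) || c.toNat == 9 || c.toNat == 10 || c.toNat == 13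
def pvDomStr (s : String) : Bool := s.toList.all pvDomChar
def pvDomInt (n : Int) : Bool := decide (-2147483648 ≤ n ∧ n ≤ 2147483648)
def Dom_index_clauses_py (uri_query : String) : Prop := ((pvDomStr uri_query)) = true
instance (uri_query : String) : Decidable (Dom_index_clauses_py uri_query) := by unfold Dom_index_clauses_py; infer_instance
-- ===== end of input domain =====

-- B replaces A's single scan with a toggling quote flag by split-on-quote plus
-- parity of the segment index (objective: alternative decomposition, same cost).

-- ===== PORT A =====
-- loop body of A's for over enumerate(uri_query)
def pvStepA (st : List Int × Bool) (p : Int × Char) : List Int × Bool :=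
  let is_quoted := if p.2 = '\'' then !st.2 else st.2
  (if p.2 = '&' && !is_quoted then st.1 ++ [p.1] else st.1, is_quoted)

def index_clauses_py (uri_query : String) : List Int :=
  ((PySem.List.enumerate uri_query.toList).foldl pvStepA ([], false)).1

-- ===== PORT B =====
-- inner loop body of B: scan a segment for '&', appending offset + local index
def pvInnerB (off : Int) (acc : List Int) (q : Int × Char) : List Int :=
  if q.2 = '&' then acc ++ [off + q.1] else acc

-- outer loop body of B over enumerate(uri_query.split("'"))
def pvStepB (st : List Int × Int) (p : Int × List Char) : List Int × Int :=
  (if p.1 % 2 == 0 then (PySem.List.enumerate p.2).foldl (pvInnerB st.2) st.1 else st.1,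
   st.2 + p.2.length + 1)

def index_clauses_py_alt (uri_query : String) : List Int :=
  ((PySem.List.enumerate (PySem.Chars.splitOn uri_query.toList ['\''])).foldl pvStepB ([], 0)).1

-- ===== PRECONDITION & SPEC =====
def Spec_index_clauses_py (uri_query : String) (out : List Int) : Prop := out = index_clauses_py_alt uri_query
instance (uri_query : String) (out : List Int) : Decidable (Spec_index_clauses_py uri_query out) := by unfold Spec_index_clauses_py; infer_instance

-- ===== CLAIM (what is proved, stated in full; the proofs are below) =====
def Claim_equal_index_clauses_py : Prop := ∀ (uri_query : String), Dom_index_clauses_py uri_query → Spec_index_clauses_py uri_query (index_clauses_py uri_query)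

-- ===== LEMMAS AND PROOFS =====

-- reference recursion: ampersand positions from index i with quote state q
def pvRef (i : Int) (q : Bool) : List Char → List Int
  | [] => []
  | c :: rest =>
    let q' := if c = '\'' then !q else q
    (if c = '&' && !q' then [i] else []) ++ pvRef (i + 1) q' rest

-- structural split on the quote character: (current head segment, later segments)
def pvSplitQ : List Char → List Char × List (List Char)
  | [] => ([], [])
  | c :: rest =>
    let r := pvSplitQ rest
    if c = '\'' then ([], r.1 :: r.2) else (c :: r.1, r.2)

-- ampersand positions of a quote-free prefix starting at offset off
def pvAmps (off : Int) : List Char → List Int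
  | [] => []
  | c :: r => (if c = '&' then [off] else []) ++ pvAmps (off + 1) r

lemma pvAmps_append (pre : List Char) (c : Char) (off : Int) :
    pvAmps off (pre ++ [c]) = pvAmps off pre ++ (if c = '&' then [off + pre.length] else []) := by
  induction pre generalizing off with
  | nil => simp [pvAmps]
  | cons x xs ih =>
    simp [pvAmps, ih (off + 1)]
    push_cast
    ring_nf

lemma pvParity_succ (n : Int) : ((n + 1) % 2 == 0) = !(n % 2 == 0) := by
  by_cases h : n % 2 = 0
  · have h2 : (n + 1) % 2 = 1 := by omega
    simp [h, h2]
  · have h2 : (n + 1) % 2 = 0 := by omega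
    simp [h, h2]

lemma pvFoldA (cs : List Char) : ∀ (i : Int) (q : Bool) (acc : List Int),
    ((PySem.List.enumerate cs i).foldl pvStepA (acc, q)).1 = acc ++ pvRef i q cs := by
  induction cs with
  | nil => intro i q acc; simp [PySem.List.enumerate_nil, pvRef]
  | cons c rest ih =>
    intro i q acc
    rw [PySem.List.enumerate_cons]
    simp only [List.foldl_cons, pvStepA, pvRef]
    by_cases hq : c = '\'' <;> by_cases ha : c = '&' <;>
      simp [hq, ha, ih] <;> cases q <;> simp

lemma pvFoldInner (pre : List Char) : ∀ (j : Int) (off : Int) (acc : List Int),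
    (PySem.List.enumerate pre j).foldl (pvInnerB off) acc = acc ++ pvAmps (off + j) pre := by
  induction pre with
  | nil => intro j off acc; simp [PySem.List.enumerate_nil, pvAmps]
  | cons c rest ih =>
    intro j off acc
    rw [PySem.List.enumerate_cons]
    simp only [List.foldl_cons, pvInnerB, pvAmps]
    by_cases ha : c = '&' <;> simp [ha, ih (j + 1) off] <;> ring_nf

lemma pvFoldB (cs : List Char) : ∀ (pre : List Char) (n off : Int) (acc : List Int),
    (((PySem.List.enumerate ((pre ++ (pvSplitQ cs).1) :: (pvSplitQ cs).2) n).foldl pvStepB (acc, off))).1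
      = (acc ++ (if n % 2 == 0 then pvAmps off pre else []))
        ++ pvRef (off + pre.length) (!(n % 2 == 0)) cs := by
  induction cs with
  | nil =>
    intro pre n off acc
    simp only [pvSplitQ, List.append_nil]
    rw [PySem.List.enumerate_cons, PySem.List.enumerate_nil]
    simp only [List.foldl_cons, List.foldl_nil, pvStepB, pvRef]
    by_cases h : (n % 2 == 0) = true
    · simp [h, pvFoldInner pre 0 off acc]
    · simp at h; simp [h]
  | cons c rest ih =>
    intro pre n off acc
    by_cases hq : c = '\''
    · -- quote: head segment closes here
      have hsp : pvSplitQ (c :: rest) = ([], (pvSplitQ rest).1 :: (pvSplitQ rest).2) := by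
        simp [pvSplitQ, hq]
      rw [hsp]
      simp only [List.append_nil]
      rw [PySem.List.enumerate_cons]
      simp only [List.foldl_cons, pvStepB]
      have hI := ih [] (n + 1) (off + pre.length + 1)
        (if (n % 2 == 0) = true then (PySem.List.enumerate pre).foldl (pvInnerB off) acc else acc)
      simp only [List.nil_append] at hI
      rw [hI]
      by_cases h : (n % 2 == 0) = true
      · simp [h, pvParity_succ, pvFoldInner pre 0 off acc, pvRef, hq, pvAmps]
      · simp at h
        simp [h, pvParity_succ, pvRef, hq, pvAmps]
    · -- ordinary char: it joins the head segment
      have hseg : (pre ++ (pvSplitQ (c :: rest)).1) = ((pre ++ [c]) ++ (pvSplitQ rest).1) := by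
        simp [pvSplitQ, hq]
      have hseg2 : (pvSplitQ (c :: rest)).2 = (pvSplitQ rest).2 := by
        simp [pvSplitQ, hq]
      rw [hseg, hseg2, ih (pre ++ [c]) n off acc]
      by_cases ha : c = '&' <;> by_cases h : (n % 2 == 0) = true <;>
        simp [pvRef, hq, ha, h, pvAmps_append] <;> ring_nf

-- splitOn with the singleton quote separator computes pvSplitQ
lemma pvGoQ : ∀ (fuel : Nat) (l cur : List Char) (acc : List (List Char)), l.length < fuel →
    PySem.Chars.splitOn.go ['\''] fuel l cur acc
      = acc.reverse ++ (cur.reverse ++ (pvSplitQ l).1) :: (pvSplitQ l).2 := by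
  intro fuel
  induction fuel with
  | zero => intro l cur acc h; omega
  | succ f ih =>
    intro l cur acc h
    cases l with
    | nil => simp [PySem.Chars.splitOn.go, pvSplitQ]
    | cons c rest =>
      rw [PySem.Chars.splitOn.go]
      by_cases hq : c = '\''
      · have hp : List.isPrefixOf ['\''] (c :: rest) = true := by simp [hq, List.isPrefixOf]
        rw [if_pos hp]
        simp only [List.length_cons, List.length_nil, List.drop_succ_cons, List.drop_zero]
        rw [ih rest [] (cur.reverse :: acc) (by simp at h; omega)]
        simp [pvSplitQ, hq]
      · have hp : List.isPrefixOf ['\''] (c :: rest) = false := by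
          simp [List.isPrefixOf]; intro hc; exact hq hc.symm
        rw [if_neg (by simp [hp])]
        rw [ih rest (c :: cur) acc (by simp at h; omega)]
        simp [pvSplitQ, hq]

lemma pvSplitOn_eq (cs : List Char) :
    PySem.Chars.splitOn cs ['\''] = (pvSplitQ cs).1 :: (pvSplitQ cs).2 := by
  unfold PySem.Chars.splitOn
  rw [pvGoQ (cs.length + 1) cs [] [] (by omega)]
  simp

-- ===== VERDICT (by name: the statement is the Claim_ definition above) =====
theorem index_clauses_py_spec : Claim_equal_index_clauses_py := by
  intro uri_query _
  unfold Spec_index_clauses_py index_clauses_py index_clauses_py_alt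
  rw [pvSplitOn_eq]
  have hb := pvFoldB uri_query.toList [] 0 0 []
  simp only [List.nil_append] at hb
  rw [hb, pvFoldA uri_query.toList 0 false []]
  simp [pvAmps]
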